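-- pv_equiv track=rewrite | github.com/maxmoneycash/ohlone-unicode | tools/harrington_htr.py | transliterate
-- ===== SOURCE A (Python) =====
-- def transliterate(text: str, mapping: list) -> str:
--     """Apply transliteration mapping (longest match first)."""
--     result = []
--     i = 0
--     while i < len(text):
--         matched = False
--         for src, tgt in mapping:
--             if text[i:i+len(src)] == src:
--                 result.append(tgt)
--                 i += len(src)
--                 matched = True
--                 break
--         if not matched:
--             result.append(text[i])
--             i += 1
--     return "".join(result)
-- ===== SOURCE B (Python) =====
-- def transliterate(text: str, mapping: list) -> str:
--     """Apply transliteration mapping (first match in mapping order)."""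
--     buckets = {}
--     for src, tgt in mapping:
--         if src:
--             buckets.setdefault(src[0], []).append((src, tgt))
--     out = []
--     i = 0
--     n = len(text)
--     while i < n:
--         for src, tgt in buckets.get(text[i], ()):
--             if text.startswith(src, i):
--                 out.append(tgt)
--                 i += len(src)
--                 break
--         else:
--             out.append(text[i])
--             i += 1
--     return "".join(out)
-- ===== Notes on version B (the rewrite author's own statement) =====
-- stated objective: faster
-- what changed: B builds a first-character bucket index of the mapping once and at each text position scans only the entries whose source starts with the current character (using startswith instead of building a slice), instead of A's scan of the whole mapping with a fresh slice per entry at every position.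
-- outside the precondition, e.g. on transliterate('aa', [('a', 'X'), ('', 'Y')]): A returns 'XX', B returns 'XX'; on transliterate('ab', [('', 'Y')]): A does not finish within the time limit, B returns 'ab'
import Mathlib
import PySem

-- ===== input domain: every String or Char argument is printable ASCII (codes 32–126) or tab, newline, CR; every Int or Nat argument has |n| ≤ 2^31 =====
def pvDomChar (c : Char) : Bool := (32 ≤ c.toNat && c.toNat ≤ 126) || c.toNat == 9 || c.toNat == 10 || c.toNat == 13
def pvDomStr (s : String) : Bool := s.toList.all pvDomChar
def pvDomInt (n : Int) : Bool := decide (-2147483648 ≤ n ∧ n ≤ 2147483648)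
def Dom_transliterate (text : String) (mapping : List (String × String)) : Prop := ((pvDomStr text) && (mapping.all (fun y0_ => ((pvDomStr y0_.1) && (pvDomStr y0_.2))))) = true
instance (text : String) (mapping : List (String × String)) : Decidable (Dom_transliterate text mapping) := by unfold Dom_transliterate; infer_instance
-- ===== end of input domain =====

-- B replaces A's per-position scan of the whole mapping by a first-character bucket index built once, scanning only candidate entries per position (faster by a constant factor).


-- ===== PORT A =====
-- while-loop as fuel recursion; fuel = text.length suffices on Pre_ (every matched source is nonempty, so i advances each step)
def trLoopA (t : List Char) (mapping : List (String × String)) :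
    Nat → Nat → List (List Char) → List (List Char)
  | 0, _, acc => acc
  | fuel+1, i, acc =>
    if i < t.length then
      -- for src, tgt in mapping: if text[i:i+len(src)] == src: … break  ≡ first match
      match mapping.find? (fun p =>
          PySem.List.slice t (some (i : Int)) (some ((i : Int) + (p.1.toList.length : Int)))
            == p.1.toList) with
      | some p => trLoopA t mapping fuel (i + p.1.toList.length) (acc ++ [p.2.toList])
      | none   => trLoopA t mapping fuel (i + 1) (acc ++ [[t.getD i ' ']])
    else acc

def transliterate (text : String) (mapping : List (String × String)) : String :=
  String.ofList (PySem.Chars.join [] (trLoopA text.toList mapping text.toList.length 0 []))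

-- ===== PORT B =====
-- buckets: first character of a (nonempty) source ↦ the mapping entries with that first character, in order
def trBuckets (mapping : List (String × String)) : PySem.Dict Char (List (String × String)) :=
  mapping.foldl (fun d p =>
    match p.1.toList with
    | []     => d
    | c :: _ => d.insert c (d.getD c [] ++ [p])) PySem.Dict.empty

-- while-loop with the same fuel discipline; text.startswith(src, i) is exact as isPrefixOf on drop i (0 ≤ i)
def trLoopB (t : List Char) (bk : PySem.Dict Char (List (String × String))) :
    Nat → Nat → List (List Char) → List (List Char)
  | 0, _, acc => acc
  | fuel+1, i, acc =>
    if i < t.length then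
      match (bk.getD (t.getD i ' ') []).find? (fun p =>
          PySem.Chars.startswith (t.drop i) p.1.toList) with
      | some p => trLoopB t bk fuel (i + p.1.toList.length) (acc ++ [p.2.toList])
      | none   => trLoopB t bk fuel (i + 1) (acc ++ [[t.getD i ' ']])
    else acc

def transliterate_alt (text : String) (mapping : List (String × String)) : String :=
  String.ofList (PySem.Chars.join [] (trLoopB text.toList (trBuckets mapping) text.toList.length 0 []))

-- ===== PRECONDITION & SPEC =====
-- Pre_ excludes mappings containing an empty source string (with nonempty text): there A's while
-- loop runs forever as soon as the empty source is the first entry matching at some position.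
def Pre_transliterate (text : String) (mapping : List (String × String)) : Prop :=
  text.toList = [] ∨ ∀ p ∈ mapping, p.1.toList ≠ []
instance (text : String) (mapping : List (String × String)) : Decidable (Pre_transliterate text mapping) := by unfold Pre_transliterate; infer_instance

def pvWitness_transliterate : String × (List (String × String)) := ("abc", [("ab", "X"), ("c", "Y")])

def Spec_transliterate (text : String) (mapping : List (String × String)) (out : String) : Prop := out = transliterate_alt text mapping
instance (text : String) (mapping : List (String × String)) (out : String) : Decidable (Spec_transliterate text mapping out) := by unfold Spec_transliterate; infer_instance

-- ===== CLAIM (what is proved, stated in full; the proofs are below) =====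
def Claim_equal_transliterate : Prop := ∀ (text : String) (mapping : List (String × String)), Dom_transliterate text mapping → Pre_transliterate text mapping → Spec_transliterate text mapping (transliterate text mapping)

-- ===== LEMMAS AND PROOFS =====

theorem tr_find?_filter {α : Type} (l : List α) (q p : α → Bool) :
    (l.filter q).find? p = l.find? (fun x => q x && p x) := by
  induction l with
  | nil => rfl
  | cons a l ih =>
    by_cases hq : q a
    · by_cases hp : p a <;> simp [hq, hp, ih]
    · simp [hq, ih]

theorem tr_find?_congr {α : Type} (l : List α) (p q : α → Bool)
    (h : ∀ x ∈ l, p x = q x) : l.find? p = l.find? q := by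
  induction l with
  | nil => rfl
  | cons a l ih =>
    have ha := h a (List.mem_cons_self)
    by_cases hp : p a
    · simp [hp, ha ▸ hp]
    · have hq : ¬ q a = true := by rw [← ha]; exact hp
      simp [hp, hq, ih (fun x hx => h x (List.mem_cons_of_mem a hx))]

-- the bucket of c holds exactly the mapping entries whose (nonempty) source starts with c, in order
theorem trBuckets_getD (mapping : List (String × String)) (c : Char)
    (d : PySem.Dict Char (List (String × String))) :
    (mapping.foldl (fun d p =>
      match p.1.toList with
      | []     => d
      | c :: _ => d.insert c (d.getD c [] ++ [p])) d).getD c []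
    = d.getD c [] ++ mapping.filter (fun p => p.1.toList.head? == some c) := by
  induction mapping generalizing d with
  | nil => simp
  | cons p l ih =>
    cases hsrc : p.1.toList with
    | nil => simp [List.foldl_cons, hsrc, ih]
    | cons c' rest =>
      rw [List.foldl_cons]
      simp only [hsrc]
      rw [ih]
      by_cases hc : c = c'
      · subst hc
        simp [PySem.Dict.getD_insert_self, hsrc]
      · rw [PySem.Dict.getD_insert_of_ne (hne := hc)]
        simp [hsrc, (by simpa using Ne.symm hc : ¬ (c' = c))]

-- at a position i < |t|, A's slice test equals "first char is t[i] AND source is a prefix of the rest"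
theorem tr_pred_eq (t : List Char) (i : Nat) (hi : i < t.length)
    (p : String × String) (hp : p.1.toList ≠ []) :
    (PySem.List.slice t (some (i : Int)) (some ((i : Int) + (p.1.toList.length : Int)))
        == p.1.toList)
    = ((p.1.toList.head? == some (t.getD i ' ')) &&
        PySem.Chars.startswith (t.drop i) p.1.toList) := by
  rw [PySem.List.slice_natCast_add]
  cases hsrc : p.1.toList with
  | nil => exact absurd hsrc hp
  | cons c rest =>
    have hdrop : t.drop i = t.getD i ' ' :: t.drop (i+1) := by
      rw [List.getD_eq_getElem t ' ' hi, ← List.getElem_cons_drop hi]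
    rw [hdrop]
    simp only [List.length_cons, List.take_succ_cons,
      PySem.Chars.startswith, List.head?_cons]
    rw [Bool.eq_iff_iff]
    simp only [beq_iff_eq, Bool.and_eq_true, List.cons_beq_cons, List.isPrefixOf_iff_prefix,
      List.prefix_iff_eq_take, Option.some.injEq]
    simp only [List.length_cons, List.take_succ_cons, List.cons.injEq]
    constructor
    · rintro ⟨h1, h2⟩
      exact ⟨h1.symm, h1.symm, h2.symm⟩
    · rintro ⟨h1, h2, h3⟩
      exact ⟨h1.symm, h3.symm⟩

-- the two loops agree step for step when every source in the mapping is nonempty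
theorem tr_loop_eq (t : List Char) (mapping : List (String × String))
    (hm : ∀ p ∈ mapping, p.1.toList ≠ []) :
    ∀ (fuel i : Nat) (acc : List (List Char)),
      trLoopA t mapping fuel i acc = trLoopB t (trBuckets mapping) fuel i acc := by
  intro fuel
  induction fuel with
  | zero => intro i acc; rfl
  | succ fuel ih =>
    intro i acc
    rw [trLoopA, trLoopB]
    by_cases hi : i < t.length
    · simp only [hi, if_true]
      have hfind :
          mapping.find? (fun p =>
            PySem.List.slice t (some (i : Int)) (some ((i : Int) + (p.1.toList.length : Int)))
              == p.1.toList)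
          = ((trBuckets mapping).getD (t.getD i ' ') []).find? (fun p =>
              PySem.Chars.startswith (t.drop i) p.1.toList) := by
        rw [trBuckets, trBuckets_getD]
        rw [PySem.Dict.getD_empty, List.nil_append, tr_find?_filter]
        exact tr_find?_congr _ _ _ (fun p hp => tr_pred_eq t i hi p (hm p hp))
      rw [hfind]
      cases ((trBuckets mapping).getD (t.getD i ' ') []).find? (fun p =>
          PySem.Chars.startswith (t.drop i) p.1.toList) with
      | none => exact ih _ _
      | some p => exact ih _ _
    · simp [hi]

-- ===== VERDICT (by name: the statement is the Claim_ definition above) =====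
theorem transliterate_spec : Claim_equal_transliterate := by
  intro text mapping _ hpre
  unfold Spec_transliterate transliterate transliterate_alt
  rcases hpre with hnil | hm
  · rw [hnil]; rfl
  · rw [tr_loop_eq text.toList mapping hm]
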